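-- pv_equiv track=rewrite | github.com/Cooliecrad/pcall | vargs_fmt.py | __pcall_execute
-- ===== SOURCE A (Python) =====
-- def __pcall_execute(length):
--     result = "#define __pcall_execute(_func, _argc) __pcall_concat(__pcall_execute, _argc)(_func)\n#define __pcall_execute0(_func) _func();\n"
--     for x in range(1, length+1):
--         result += f"#define __pcall_execute{x}(_func) _func("
--         for index in range(x, 1, -1):
--             result += f"tmp{index}, "
--         result += f"tmp{1});\n"
--     return result
-- ===== SOURCE B (Python) =====
-- def __pcall_execute(length):
--     result = "#define __pcall_execute(_func, _argc) __pcall_concat(__pcall_execute, _argc)(_func)\n#define __pcall_execute0(_func) _func();\n"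
--     args = ""
--     for x in range(1, length+1):
--         args = "tmp1" if x == 1 else f"tmp{x}, " + args
--         result += f"#define __pcall_execute{x}(_func) _func({args});\n"
--     return result
-- ===== Notes on version B (the rewrite author's own statement) =====
-- stated objective: faster
-- what changed: B keeps a running argument-list string and extends it by one 'tmpX, ' per line instead of regenerating the whole list with an inner countdown loop; intended as faster (a timing run measured B ~22x faster at n=4096, though both are bounded below by the quadratic output size).
import Mathlib
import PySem

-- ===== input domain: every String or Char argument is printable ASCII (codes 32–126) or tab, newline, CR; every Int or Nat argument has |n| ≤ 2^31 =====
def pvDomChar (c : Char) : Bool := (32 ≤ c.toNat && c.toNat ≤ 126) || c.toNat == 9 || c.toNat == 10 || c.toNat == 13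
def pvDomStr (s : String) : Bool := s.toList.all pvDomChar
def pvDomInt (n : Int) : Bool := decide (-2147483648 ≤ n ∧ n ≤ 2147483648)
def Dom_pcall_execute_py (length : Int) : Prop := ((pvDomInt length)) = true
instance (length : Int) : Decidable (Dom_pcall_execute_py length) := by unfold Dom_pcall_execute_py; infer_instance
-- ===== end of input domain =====

-- B replaces A's inner countdown loop by a running argument-list string extended once per line (one loop step per line instead of quadratically many; intended as faster, measured ~22x at n=4096 in a timing run).

-- ===== PORT A =====
def pcall_execute_py (length : Int) : String :=
  (PySem.List.pyRange 1 (length + 1) 1).foldl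
    (fun result x =>
      let result := result ++ "#define __pcall_execute" ++ PySem.Int.toStr x ++ "(_func) _func("
      let result := (PySem.List.pyRange x 1 (-1)).foldl
        (fun r index => r ++ "tmp" ++ PySem.Int.toStr index ++ ", ") result
      result ++ "tmp" ++ PySem.Int.toStr 1 ++ ");\n")
    "#define __pcall_execute(_func, _argc) __pcall_concat(__pcall_execute, _argc)(_func)\n#define __pcall_execute0(_func) _func();\n"

-- ===== PORT B =====
def pcall_execute_py_alt (length : Int) : String :=
  ((PySem.List.pyRange 1 (length + 1) 1).foldl
    (fun (st : String × String) x =>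
      let args := if x == 1 then "tmp1" else "tmp" ++ PySem.Int.toStr x ++ ", " ++ st.2
      (st.1 ++ "#define __pcall_execute" ++ PySem.Int.toStr x ++ "(_func) _func(" ++ args ++ ");\n", args))
    ("#define __pcall_execute(_func, _argc) __pcall_concat(__pcall_execute, _argc)(_func)\n#define __pcall_execute0(_func) _func();\n", "")).1

-- ===== PRECONDITION & SPEC =====
def Spec_pcall_execute_py (length : Int) (out : String) : Prop := out = pcall_execute_py_alt length
instance (length : Int) (out : String) : Decidable (Spec_pcall_execute_py length out) := by unfold Spec_pcall_execute_py; infer_instance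

-- ===== CLAIM (what is proved, stated in full; the proofs are below) =====
def Claim_equal_pcall_execute_py : Prop := ∀ (length : Int), Dom_pcall_execute_py length → Spec_pcall_execute_py length (pcall_execute_py length)

-- ===== LEMMAS AND PROOFS =====

-- the argument list of line x, as B maintains it
def pvArgs : Nat → String
  | 0 => ""
  | 1 => "tmp1"
  | (n+2) => "tmp" ++ PySem.Int.toStr ((n : Int) + 2) ++ ", " ++ pvArgs (n+1)

theorem pvInner (x : Nat) : ∀ (r : String),
    (PySem.List.pyRange ((x : Int) + 1) 1 (-1)).foldl
      (fun r index => r ++ "tmp" ++ PySem.Int.toStr index ++ ", ") r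
      ++ "tmp" ++ PySem.Int.toStr 1
    = r ++ pvArgs (x + 1) := by
  induction x with
  | zero =>
    intro r
    rw [PySem.List.pyRange_neg_one_eq_nil (by norm_num)]
    simp only [List.foldl_nil]
    have h1 : PySem.Int.toStr 1 = "1" := by decide
    rw [h1]
    show r ++ "tmp" ++ "1" = r ++ pvArgs 1
    have : "tmp" ++ "1" = pvArgs 1 := by decide
    rw [String.append_assoc, this]
  | succ k ih =>
    intro r
    push_cast
    rw [show ((k : Int) + 1 + 1) = ((k : Int) + 2) by ring]
    rw [PySem.List.pyRange_neg_one_cons (by omega)]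
    simp only [List.foldl_cons]
    rw [show ((k : Int) + 2 - 1) = ((k : Int) + 1) by ring]
    rw [ih]
    show r ++ "tmp" ++ PySem.Int.toStr ((k : Int) + 2) ++ ", " ++ pvArgs (k + 1)
       = r ++ ("tmp" ++ PySem.Int.toStr ((k : Int) + 2) ++ ", " ++ pvArgs (k + 1))
    simp [String.append_assoc]

theorem pvMain (n : Nat) :
    ((PySem.List.pyRange 1 (1 + (n : Int)) 1).foldl
      (fun (st : String × String) x =>
        let args := if x == 1 then "tmp1" else "tmp" ++ PySem.Int.toStr x ++ ", " ++ st.2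
        (st.1 ++ "#define __pcall_execute" ++ PySem.Int.toStr x ++ "(_func) _func(" ++ args ++ ");\n", args))
      ("#define __pcall_execute(_func, _argc) __pcall_concat(__pcall_execute, _argc)(_func)\n#define __pcall_execute0(_func) _func();\n", ""))
    = ((PySem.List.pyRange 1 (1 + (n : Int)) 1).foldl
        (fun result x =>
          let result := result ++ "#define __pcall_execute" ++ PySem.Int.toStr x ++ "(_func) _func("
          let result := (PySem.List.pyRange x 1 (-1)).foldl
            (fun r index => r ++ "tmp" ++ PySem.Int.toStr index ++ ", ") result
          result ++ "tmp" ++ PySem.Int.toStr 1 ++ ");\n")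
        "#define __pcall_execute(_func, _argc) __pcall_concat(__pcall_execute, _argc)(_func)\n#define __pcall_execute0(_func) _func();\n",
       pvArgs n) := by
  induction n with
  | zero =>
    rw [PySem.List.pyRange_one_eq_nil (by norm_num)]
    simp [pvArgs]
  | succ m ih =>
    have hsplit : PySem.List.pyRange 1 (1 + ((m : Int) + 1)) 1
        = PySem.List.pyRange 1 (1 + (m : Int)) 1 ++ [1 + (m : Int)] := by
      have := PySem.List.pyRange_one_succ_right (a := 1) (b := 1 + (m : Int)) (by omega)
      rw [show (1 : Int) + ((m : Int) + 1) = (1 + (m : Int)) + 1 by ring]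
      exact this
    push_cast
    rw [hsplit, List.foldl_append, List.foldl_append, ih]
    simp only [List.foldl_cons, List.foldl_nil]
    -- the single step at x = 1 + m
    have hargs : (if (1 + (m : Int)) == 1 then "tmp1"
                  else "tmp" ++ PySem.Int.toStr (1 + (m : Int)) ++ ", " ++ pvArgs m)
                 = pvArgs (m + 1) := by
      cases m with
      | zero => simp [pvArgs]
      | succ k =>
        have hne : (1 + ((k : Int) + 1)) ≠ 1 := by push_cast; omega
        rw [if_neg (by simpa using hne)]
        show "tmp" ++ PySem.Int.toStr (1 + ((k : Int) + 1)) ++ ", " ++ pvArgs (k + 1)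
           = pvArgs (k + 2)
        rw [show (1 : Int) + ((k : Int) + 1) = (k : Int) + 2 by ring]
        rfl
    have hinner := pvInner m
      (((PySem.List.pyRange 1 (1 + (m : Int)) 1).foldl
        (fun result x =>
          let result := result ++ "#define __pcall_execute" ++ PySem.Int.toStr x ++ "(_func) _func("
          let result := (PySem.List.pyRange x 1 (-1)).foldl
            (fun r index => r ++ "tmp" ++ PySem.Int.toStr index ++ ", ") result
          result ++ "tmp" ++ PySem.Int.toStr 1 ++ ");\n")
        "#define __pcall_execute(_func, _argc) __pcall_concat(__pcall_execute, _argc)(_func)\n#define __pcall_execute0(_func) _func();\n")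
        ++ "#define __pcall_execute" ++ PySem.Int.toStr (1 + (m : Int)) ++ "(_func) _func(")
    rw [show ((m : Int) + 1) = (1 + (m : Int)) by ring] at hinner
    rw [hargs, hinner]

theorem pvEq (length : Int) : pcall_execute_py length = pcall_execute_py_alt length := by
  unfold pcall_execute_py pcall_execute_py_alt
  by_cases h : length ≤ 0
  · rw [PySem.List.pyRange_one_eq_nil (by omega)]
    rfl
  · have hn : length = ((length.toNat : Nat) : Int) := by omega
    rw [show length + 1 = 1 + ((length.toNat : Nat) : Int) by omega]
    rw [pvMain length.toNat]

-- ===== VERDICT (by name: the statement is the Claim_ definition above) =====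
theorem pcall_execute_py_spec : Claim_equal_pcall_execute_py := by
  intro length _
  exact pvEq length
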